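-- pv_equiv track=rewrite | github.com/ClaudioRizzo/coding_excercise | magicString/magic_strings.py | same_zero_one
-- ===== SOURCE A (Python) =====
-- def same_zero_one(s):
-- 	zero = 0
-- 	one = 0
-- 	for c in s:
-- 		if c != '0' and c != '1':
-- 			return False
-- 		elif c == '0':
-- 			zero += 1
-- 		else:
-- 			one += 1
--
-- 	return zero == one
-- ===== SOURCE B (Python) =====
-- def same_zero_one(s):
--     # Sort-and-compare: a valid string with balanced digits sorts exactly to
--     # the canonical form of half zero-characters followed by half one-characters.
--     half, rem = divmod(len(s), 2)
--     return rem == 0 and sorted(s) == ['0'] * half + ['1'] * half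
-- ===== Notes on version B (the rewrite author's own statement) =====
-- stated objective: alternative
-- what changed: Replaces the counting loop with a sort-and-compare: the sorted character list must equal the canonical list of half zeros followed by half ones.
import Mathlib
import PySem

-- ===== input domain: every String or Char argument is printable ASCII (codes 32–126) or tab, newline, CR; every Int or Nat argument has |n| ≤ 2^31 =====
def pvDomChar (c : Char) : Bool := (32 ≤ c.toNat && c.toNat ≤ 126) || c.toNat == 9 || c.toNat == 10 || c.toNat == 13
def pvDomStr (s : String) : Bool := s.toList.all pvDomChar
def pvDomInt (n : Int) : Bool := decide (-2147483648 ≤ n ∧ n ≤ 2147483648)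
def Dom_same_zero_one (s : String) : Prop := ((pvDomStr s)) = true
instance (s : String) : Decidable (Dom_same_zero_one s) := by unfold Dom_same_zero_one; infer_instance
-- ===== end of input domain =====

-- B replaces A's counting loop by sort-and-compare against the canonical sorted form (half zeros then half ones); objective: alternative.
-- ===== PORT A =====
def same_zero_one_go (cs : List Char) (zero one : Int) : Bool :=
  match cs with
  | [] => zero == one
  | c :: rest =>
    if c ≠ '0' ∧ c ≠ '1' then false
    else if c == '0' then same_zero_one_go rest (zero + 1) one
    else same_zero_one_go rest zero (one + 1)

def same_zero_one (s : String) : Bool := same_zero_one_go s.toList 0 0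

-- ===== PORT B =====
def same_zero_one_alt (s : String) : Bool :=
  let half := s.toList.length / 2
  let rem := s.toList.length % 2
  rem == 0 &&
    (PySem.List.sorted s.toList (fun c => c) false ==
      List.replicate half '0' ++ List.replicate half '1')

-- ===== PRECONDITION & SPEC =====
def Spec_same_zero_one (s : String) (out : Bool) : Prop := out = same_zero_one_alt s
instance (s : String) (out : Bool) : Decidable (Spec_same_zero_one s out) := by unfold Spec_same_zero_one; infer_instance

-- ===== CLAIM (what is proved, stated in full; the proofs are below) =====
def Claim_equal_same_zero_one : Prop := ∀ (s : String), Dom_same_zero_one s → Spec_same_zero_one s (same_zero_one s)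

-- ===== LEMMAS AND PROOFS =====

lemma same_zero_one_go_eq (cs : List Char) (zero one : Int) :
    same_zero_one_go cs zero one =
      ((cs.all fun c => c == '0' || c == '1') &&
        (zero + cs.count '0' == one + cs.count '1')) := by
  induction cs generalizing zero one with
  | nil => simp [same_zero_one_go]
  | cons c rest ih =>
    by_cases h0 : c = '0'
    · subst h0
      simp [same_zero_one_go, ih]
      congr 2
      ring
    · by_cases h1 : c = '1'
      · subst h1
        simp [same_zero_one_go, ih]
        congr 2
        ring
      · simp [same_zero_one_go, h0, h1, List.all_cons, beq_iff_eq]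

lemma perm_canonical (cs : List Char) (h : ∀ c ∈ cs, c = '0' ∨ c = '1') :
    cs.Perm (List.replicate (cs.count '0') '0' ++ List.replicate (cs.count '1') '1') := by
  induction cs with
  | nil => simp
  | cons c rest ih =>
    have hrest : ∀ c ∈ rest, c = '0' ∨ c = '1' := fun x hx => h x (List.mem_cons_of_mem _ hx)
    rcases h c (List.mem_cons_self) with hc | hc
    · subst hc
      simpa [List.count_cons, List.replicate_succ] using (ih hrest).cons '0'
    · subst hc
      have : ('1' :: rest).Perm
          ('1' :: (List.replicate (rest.count '0') '0' ++ List.replicate (rest.count '1') '1')) :=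
        (ih hrest).cons '1'
      refine this.trans ?_
      simp only [List.count_cons, List.replicate_succ]
      exact (List.perm_middle).symm

lemma length_eq_counts (cs : List Char) (h : ∀ c ∈ cs, c = '0' ∨ c = '1') :
    cs.length = cs.count '0' + cs.count '1' := by
  induction cs with
  | nil => simp
  | cons c rest ih =>
    have hrest : ∀ c ∈ rest, c = '0' ∨ c = '1' := fun x hx => h x (List.mem_cons_of_mem _ hx)
    rcases h c (List.mem_cons_self) with hc | hc <;> subst hc <;>
      simp [List.count_cons, ih hrest] <;> omega

lemma canonical_pairwise (h : ℕ) :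
    (List.replicate h '0' ++ List.replicate h '1').Pairwise (· ≤ ·) := by
  rw [List.pairwise_append]
  refine ⟨?_, ?_, ?_⟩
  · exact List.pairwise_replicate.mpr (Or.inr le_rfl)
  · exact List.pairwise_replicate.mpr (Or.inr le_rfl)
  · intro a ha b hb
    rw [List.eq_of_mem_replicate ha, List.eq_of_mem_replicate hb]
    decide

-- ===== VERDICT (by name: the statement is the Claim_ definition above) =====
theorem same_zero_one_spec : Claim_equal_same_zero_one := by
  intro s _
  unfold Spec_same_zero_one same_zero_one same_zero_one_alt
  set cs := s.toList with hcs
  rw [same_zero_one_go_eq, Bool.eq_iff_iff]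
  simp only [Bool.and_eq_true, beq_iff_eq, List.all_eq_true, Bool.or_eq_true, zero_add]
  constructor
  · rintro ⟨hall, hcnt⟩
    have hall' : ∀ c ∈ cs, c = '0' ∨ c = '1' := by
      intro c hc; simpa using hall c hc
    have hz : (cs.count '0' : Int) = cs.count '1' := hcnt
    have hz' : cs.count '0' = cs.count '1' := by exact_mod_cast hz
    have hlen := length_eq_counts cs hall'
    have hperm := perm_canonical cs hall'
    have hhalf0 : cs.length / 2 = cs.count '0' := by omega
    have hhalf1 : cs.length / 2 = cs.count '1' := by omega
    have e : List.replicate (cs.length / 2) '0' ++ List.replicate (cs.length / 2) '1'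
        = List.replicate (cs.count '0') '0' ++ List.replicate (cs.count '1') '1' := by
      congr 1
      · rw [hhalf0]
      · rw [hhalf1]
    constructor
    · omega
    · refine PySem.List.sorted_id_eq_of_perm_of_pairwise _ _ ?_ ?_
      · rw [e]; exact hperm.symm
      · exact canonical_pairwise _
  · rintro ⟨hrem, hsorted⟩
    set h := cs.length / 2 with hh
    have hperm : (List.replicate h '0' ++ List.replicate h '1').Perm cs := by
      rw [← hsorted]; exact PySem.List.sorted_perm cs (fun c => c) false
    have hc0 : cs.count '0' = h := by
      rw [← hperm.count_eq]; simp [List.count_replicate]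
    have hc1 : cs.count '1' = h := by
      rw [← hperm.count_eq]; simp [List.count_replicate]
    refine ⟨?_, ?_⟩
    · intro c hc
      have := hperm.mem_iff.mpr hc
      rcases List.mem_append.mp this with hm | hm <;>
        simp [List.eq_of_mem_replicate hm]
    · rw [hc0, hc1]
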